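-- pv_equiv track=rewrite | github.com/bgeneto/htmx-fastapi-template | app/url_validator.py | is_safe_path
-- ===== SOURCE A (Python) =====
-- def is_safe_path(path: str) -> bool:
--     """
--     Validate that a path is safe for internal use
--
--     Args:
--         path: Path to validate
--
--     Returns:
--         True if path is safe, False otherwise
--     """
--     if not path:
--         return False
--
--     # Check for path traversal
--     if ".." in path:
--         return False
--
--     # Check for null bytes
--     if "\x00" in path:
--         return False
--
--     # Check for dangerous characters
--     dangerous = ["<", ">", "|", "&", ";", "`", "$"]
--     if any(char in path for char in dangerous):
--         return False
--
--     return True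
-- ===== SOURCE B (Python) =====
-- def is_safe_path(path: str) -> bool:
--     """Single left-to-right scan: reject forbidden characters and '..' pairs."""
--     if not path:
--         return False
--     bad = set("\x00<>|&;`$")
--     prev = ""
--     for ch in path:
--         if ch in bad or (prev == "." and ch == "."):
--             return False
--         prev = ch
--     return True
-- ===== Notes on version B (the rewrite author's own statement) =====
-- stated objective: alternative
-- what changed: Replaces A's four separate whole-string substring/membership scans with a single left-to-right pass that tracks the previous character to detect the traversal sequence and checks each character against one forbidden set.
import Mathlib
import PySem

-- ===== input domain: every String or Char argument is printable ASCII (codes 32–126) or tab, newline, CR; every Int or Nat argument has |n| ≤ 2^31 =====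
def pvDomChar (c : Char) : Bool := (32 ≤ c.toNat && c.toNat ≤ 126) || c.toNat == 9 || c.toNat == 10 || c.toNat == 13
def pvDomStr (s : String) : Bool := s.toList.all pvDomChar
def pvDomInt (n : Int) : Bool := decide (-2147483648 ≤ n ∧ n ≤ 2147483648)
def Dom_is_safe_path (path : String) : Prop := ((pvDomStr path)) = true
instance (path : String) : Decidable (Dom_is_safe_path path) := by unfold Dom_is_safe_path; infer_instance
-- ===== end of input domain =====

-- B replaces A's four separate whole-string scans with one left-to-right pass (alternative decomposition).

-- ===== PORT A =====
-- 'if not path' = emptiness test; '".." in path' etc. = PySem.Str.isIn;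
-- the 'any(char in path for char in dangerous)' generator = List.any over the same string list.
def is_safe_path (path : String) : Bool :=
  if path.toList = [] then false
  else if PySem.Str.isIn ".." path then false
  else if PySem.Str.isIn "\x00" path then false
  else if (["<", ">", "|", "&", ";", "`", "$"] : List String).any
            (fun ch => PySem.Str.isIn ch path) then false
  else true

-- ===== PORT B =====
def pvBadChar (c : Char) : Bool :=
  c ∈ (['\x00', '<', '>', '|', '&', ';', '`', '$'] : List Char)

-- the body of B's for-loop: prev is the previously seen character
def pvScan : Char → List Char → Bool
  | _, [] => true
  | p, c :: cs => if pvBadChar c || (p == '.' && c == '.') then false else pvScan c cs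

def is_safe_path_alt (path : String) : Bool :=
  match path.toList with
  | [] => false
  | c :: cs => if pvBadChar c then false else pvScan c cs

-- ===== PRECONDITION & SPEC =====
def Spec_is_safe_path (path : String) (out : Bool) : Prop := out = is_safe_path_alt path
instance (path : String) (out : Bool) : Decidable (Spec_is_safe_path path out) := by unfold Spec_is_safe_path; infer_instance

-- ===== CLAIM (what is proved, stated in full; the proofs are below) =====
def Claim_equal_is_safe_path : Prop := ∀ (path : String), Dom_is_safe_path path → Spec_is_safe_path path (is_safe_path path)

-- ===== LEMMAS AND PROOFS =====

theorem pair_infix_cons (a b p c : Char) (cs : List Char) :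
    [a, b] <:+: p :: c :: cs ↔ (p = a ∧ c = b) ∨ [a, b] <:+: c :: cs := by
  constructor
  · intro h
    rcases List.infix_cons_iff.mp h with hpre | hinf
    · left
      rcases hpre with ⟨t, ht⟩
      injection ht with h1 ht
      injection ht with h2 _
      exact ⟨h1.symm, h2.symm⟩
    · right; exact hinf
  · rintro (⟨rfl, rfl⟩ | h)
    · exact ⟨[], cs, rfl⟩
    · exact List.infix_cons_iff.mpr (Or.inr h)

theorem pvScan_iff (l : List Char) (p : Char) :
    pvScan p l = true ↔ (∀ c ∈ l, pvBadChar c = false) ∧ ¬ ['.', '.'] <:+: (p :: l) := by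
  induction l generalizing p with
  | nil =>
      constructor
      · intro _
        refine ⟨by simp, fun h => ?_⟩
        have := h.length_le
        simp at this
      · intro _; rfl
  | cons c cs ih =>
      simp only [pvScan]
      rw [pair_infix_cons]
      by_cases hb : pvBadChar c = true
      · have hcond : (pvBadChar c || (p == '.' && c == '.')) = true := by simp [hb]
        rw [hcond, if_pos rfl]
        constructor
        · intro h; exact absurd h (by simp)
        · rintro ⟨hall, -⟩
          exact absurd (hall c (by simp)) (by simp [hb])
      · by_cases hp : (p == '.' && c == '.') = true
        · have hpd : p = '.' ∧ c = '.' := by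
            simpa [Bool.and_eq_true, beq_iff_eq] using hp
          have hcond : (pvBadChar c || (p == '.' && c == '.')) = true := by simp [hp]
          rw [hcond, if_pos rfl]
          constructor
          · intro h; exact absurd h (by simp)
          · rintro ⟨-, hni⟩
            exact (hni (Or.inl hpd)).elim
        · have hnp : ¬(p = '.' ∧ c = '.') := by
            intro hc
            exact hp (by simp [hc.1, hc.2])
          have hcond : (pvBadChar c || (p == '.' && c == '.')) = false := by
            simp only [Bool.or_eq_false_iff]
            exact ⟨by simpa using hb, by simpa using hp⟩
          rw [hcond, if_neg (by simp)]
          rw [ih c]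
          constructor
          · rintro ⟨h1, h2⟩
            refine ⟨?_, ?_⟩
            · intro x hx
              rcases List.mem_cons.mp hx with rfl | hx
              · simpa using hb
              · exact h1 x hx
            · rintro (hpair | hinf)
              · exact hnp hpair
              · exact h2 hinf
          · rintro ⟨h1, h2⟩
            exact ⟨fun x hx => h1 x (List.mem_cons_of_mem _ hx), fun hinf => h2 (Or.inr hinf)⟩

theorem singleton_infix_iff (a : Char) (l : List Char) : [a] <:+: l ↔ a ∈ l := by
  constructor
  · intro h; exact h.mem (by simp)
  · intro h
    rcases List.append_of_mem h with ⟨s, t, rfl⟩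
    exact ⟨s, t, by simp⟩

theorem ports_agree (path : String) : is_safe_path path = is_safe_path_alt path := by
  unfold is_safe_path is_safe_path_alt
  cases h : path.toList with
  | nil => simp
  | cons c cs =>
      simp only [h]
      have hdd : PySem.Str.isIn ".." path = true ↔ ['.', '.'] <:+: (c :: cs) := by
        rw [PySem.Str.isIn_iff_infix, h]; rfl
      have hmem : ∀ (a : Char) (s : String), s.toList = [a] →
          (PySem.Str.isIn s path = true ↔ a ∈ c :: cs) := by
        intro a s hs
        rw [PySem.Str.isIn_iff_infix, hs, h, singleton_infix_iff]
      have hz := hmem '\x00' "\x00" rfl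
      have h1 := hmem '<' "<" rfl
      have h2 := hmem '>' ">" rfl
      have h3 := hmem '|' "|" rfl
      have h4 := hmem '&' "&" rfl
      have h5 := hmem ';' ";" rfl
      have h6 := hmem '`' "`" rfl
      have h7 := hmem '$' "$" rfl
      by_cases hDD : ['.', '.'] <:+: (c :: cs)
      · -- A returns false; show B does too
        rw [if_neg (by simp), if_pos (hdd.mpr hDD)]
        by_cases hbc : pvBadChar c = true
        · simp [hbc]
        · rw [if_neg (by simp [hbc])]
          symm
          rw [← Bool.not_eq_true, pvScan_iff]
          intro ⟨_, hni⟩; exact hni hDD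
      · rw [if_neg (by simp), if_neg (by rw [hdd]; simpa using hDD)]
        by_cases hbad : ∃ x ∈ c :: cs, pvBadChar x = true
        · -- A returns false via null-byte or dangerous branch; B returns false
          rcases hbad with ⟨x, hx, hbx⟩
          have hAfalse :
              (if PySem.Str.isIn "\x00" path = true then false
               else if (["<", ">", "|", "&", ";", "`", "$"] : List String).any
                        (fun ch => PySem.Str.isIn ch path) = true then false else true) = false := by
            have hxmem : x ∈ (['\x00', '<', '>', '|', '&', ';', '`', '$'] : List Char) := by
              simpa [pvBadChar] using hbx
            fin_cases hxmem <;>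
              simp_all [hz, h1, h2, h3, h4, h5, h6, h7]
          rw [hAfalse]
          by_cases hbc : pvBadChar c = true
          · simp [hbc]
          · rw [if_neg (by simp [hbc])]
            symm
            rw [← Bool.not_eq_true, pvScan_iff]
            rintro ⟨hall, -⟩
            rcases List.mem_cons.mp hx with rfl | hx'
            · exact absurd hbx (by simp [hbc])
            · exact absurd hbx (by simp [hall x hx'])
        · push Not at hbad
          have hallf : ∀ x ∈ c :: cs, pvBadChar x = false := by
            intro x hx
            have := hbad x hx
            simpa using this
          have hAtrue :
              (if PySem.Str.isIn "\x00" path = true then false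
               else if (["<", ">", "|", "&", ";", "`", "$"] : List String).any
                        (fun ch => PySem.Str.isIn ch path) = true then false else true) = true := by
            rw [if_neg, if_neg]
            · simp only [List.any_eq_true]
              rintro ⟨s, hs, hsin⟩
              have key : ∀ (a : Char), a ∈ (['\x00', '<', '>', '|', '&', ';', '`', '$'] : List Char) →
                  a ∈ c :: cs → False := by
                intro a ha hac
                have := hallf a hac
                simp [pvBadChar, ha] at this
              fin_cases hs
              · exact key _ (by decide) (h1.mp hsin)
              · exact key _ (by decide) (h2.mp hsin)
              · exact key _ (by decide) (h3.mp hsin)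
              · exact key _ (by decide) (h4.mp hsin)
              · exact key _ (by decide) (h5.mp hsin)
              · exact key _ (by decide) (h6.mp hsin)
              · exact key _ (by decide) (h7.mp hsin)
            · rw [hz]
              intro hmem0
              have := hallf _ hmem0
              simp [pvBadChar] at this
          rw [hAtrue, if_neg (by simp [hallf c (by simp)])]
          symm
          rw [pvScan_iff]
          exact ⟨fun x hx => hallf x (List.mem_cons_of_mem _ hx), hDD⟩

-- ===== VERDICT (by name: the statement is the Claim_ definition above) =====
theorem is_safe_path_spec : Claim_equal_is_safe_path := by
  intro path _
  unfold Spec_is_safe_path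
  exact ports_agree path
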